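-- pv_equiv track=rewrite | github.com/DragnSlav3/MisionTIC-2022-Universidad-Nacional-de-Colombia | Ciclo 1/Retos/Reto_5/inventarios.py | consulta_max_productos_intercambio
-- ===== SOURCE A (Python) =====
-- def consulta_max_productos_intercambio(lista_principal, lista_sucursal):
--     lista_a = []
--     lista_b = []
--     salida = 0
--     for i in lista_principal:
--         if i not in lista_sucursal:
--             lista_a.append(i)
--
--     for i in lista_sucursal:
--         if i not in lista_principal:
--             lista_b.append(i)
--
--     if len(lista_a) < len(lista_b):
--         salida = (len(lista_a))
--     else:
--         salida = (len(lista_b))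
--     return salida
-- ===== SOURCE B (Python) =====
-- def consulta_max_productos_intercambio(lista_principal, lista_sucursal):
--     a = sorted(lista_principal)
--     b = sorted(lista_sucursal)
--     i = j = 0
--     solo_a = 0
--     solo_b = 0
--     while i < len(a) and j < len(b):
--         if a[i] < b[j]:
--             solo_a += 1
--             i += 1
--         elif b[j] < a[i]:
--             solo_b += 1
--             j += 1
--         else:
--             v = a[i]
--             while i < len(a) and a[i] == v:
--                 i += 1
--             while j < len(b) and b[j] == v:
--                 j += 1
--     solo_a += len(a) - i
--     solo_b += len(b) - j
--     return min(solo_a, solo_b)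
-- ===== Notes on version B (the rewrite author's own statement) =====
-- stated objective: faster
-- what changed: Replaces the two quadratic membership-scan passes with sort-then-merge: both lists are sorted and a single two-pointer merge counts the elements unique to each side, skipping runs of equal values.
import Mathlib
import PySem

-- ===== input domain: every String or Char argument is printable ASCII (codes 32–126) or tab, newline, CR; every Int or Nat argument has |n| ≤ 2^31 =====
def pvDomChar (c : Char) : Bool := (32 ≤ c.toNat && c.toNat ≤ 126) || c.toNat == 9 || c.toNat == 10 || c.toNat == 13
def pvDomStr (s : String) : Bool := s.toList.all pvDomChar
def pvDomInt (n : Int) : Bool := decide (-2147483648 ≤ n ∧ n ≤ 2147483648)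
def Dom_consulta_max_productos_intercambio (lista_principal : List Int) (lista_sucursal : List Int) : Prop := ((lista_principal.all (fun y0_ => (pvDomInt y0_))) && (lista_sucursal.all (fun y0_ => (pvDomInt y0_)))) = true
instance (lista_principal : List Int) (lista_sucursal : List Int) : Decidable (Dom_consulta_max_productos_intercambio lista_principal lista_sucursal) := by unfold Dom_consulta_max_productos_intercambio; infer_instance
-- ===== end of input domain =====

-- B replaces A's two quadratic membership-scan passes with sort-then-merge: a single
-- two-pointer merge of the two sorted lists counts the elements unique to each side (objective: faster).


-- ===== PORT A =====
def consulta_max_productos_intercambio (lista_principal : List Int) (lista_sucursal : List Int) : Int :=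
  let lista_a := lista_principal.foldl
    (fun acc i => if !(lista_sucursal.contains i) then acc ++ [i] else acc) []
  let lista_b := lista_sucursal.foldl
    (fun acc i => if !(lista_principal.contains i) then acc ++ [i] else acc) []
  if (lista_a.length : Int) < (lista_b.length : Int) then (lista_a.length : Int)
  else (lista_b.length : Int)

-- ===== PORT B =====
-- Source B's two-pointer merge over the sorted lists; the index pair (i, j) into the sorted
-- arrays becomes structural recursion on the two remaining suffixes; the inner
-- equal-run-skipping while loops become dropWhile of the equal prefix.
def pvMergeCount : List Int → List Int → Nat × Nat
  | [], bs => (0, bs.length)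
  | a :: as, [] => ((a :: as).length, 0)
  | a :: as, b :: bs =>
    if a < b then
      let r := pvMergeCount as (b :: bs); (r.1 + 1, r.2)
    else if b < a then
      let r := pvMergeCount (a :: as) bs; (r.1, r.2 + 1)
    else
      pvMergeCount (as.dropWhile (· == a)) (bs.dropWhile (· == b))
termination_by as bs => as.length + bs.length
decreasing_by
  · simp only [List.length_cons]; omega
  · simp only [List.length_cons]; omega
  · have h1 := List.length_dropWhile_le (· == a) as
    have h2 := List.length_dropWhile_le (· == b) bs
    simp only [List.length_cons]; omega

def consulta_max_productos_intercambio_alt (lista_principal : List Int) (lista_sucursal : List Int) : Int :=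
  let a := PySem.List.sorted lista_principal (fun x => x) false
  let b := PySem.List.sorted lista_sucursal (fun x => x) false
  let r := pvMergeCount a b
  min (r.1 : Int) (r.2 : Int)

-- ===== PRECONDITION & SPEC =====
def Spec_consulta_max_productos_intercambio (lista_principal : List Int) (lista_sucursal : List Int) (out : Int) : Prop := out = consulta_max_productos_intercambio_alt lista_principal lista_sucursal
instance (lista_principal : List Int) (lista_sucursal : List Int) (out : Int) : Decidable (Spec_consulta_max_productos_intercambio lista_principal lista_sucursal out) := by unfold Spec_consulta_max_productos_intercambio; infer_instance

-- ===== CLAIM (what is proved, stated in full; the proofs are below) =====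
def Claim_equal_consulta_max_productos_intercambio : Prop := ∀ (lista_principal : List Int) (lista_sucursal : List Int), Dom_consulta_max_productos_intercambio lista_principal lista_sucursal → Spec_consulta_max_productos_intercambio lista_principal lista_sucursal (consulta_max_productos_intercambio lista_principal lista_sucursal)

-- ===== LEMMAS AND PROOFS =====

-- every element remaining after dropping the leading run of a's from a sorted list exceeds a
lemma pv_lt_of_mem_dropWhile {a x : Int} : ∀ {l : List Int}, l.Pairwise (· ≤ ·) →
    (∀ y ∈ l, a ≤ y) → x ∈ l.dropWhile (· == a) → a < x := by
  intro l
  induction l with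
  | nil => intro _ _ hx; simp [List.dropWhile] at hx
  | cons c t ih =>
    intro hp ha hx
    by_cases hc : c = a
    · subst hc
      rw [List.dropWhile_cons_of_pos (by simp)] at hx
      exact ih hp.tail (fun y hy => ha y (List.mem_cons_of_mem _ hy)) hx
    · rw [List.dropWhile_cons_of_neg (by simp [hc])] at hx
      have hac : a < c := lt_of_le_of_ne (ha c (List.mem_cons_self)) (Ne.symm hc)
      rcases List.mem_cons.mp hx with rfl | hxt
      · exact hac
      · exact lt_of_lt_of_le hac (List.rel_of_pairwise_cons hp hxt)

-- membership in a :: l is unchanged by dropping the leading run of a's, for x ≠ a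
lemma pv_contains_dropWhile {a x : Int} (hx : x ≠ a) (l : List Int) :
    (a :: l).contains x = (l.dropWhile (· == a)).contains x := by
  conv_lhs => rw [← List.takeWhile_append_dropWhile (p := (· == a)) (l := l)]
  have ht : x ∉ l.takeWhile (· == a) := fun hmem => hx (by simpa using List.mem_takeWhile_imp hmem)
  simp only [List.contains_eq_mem, List.mem_cons, List.mem_append]
  rw [decide_eq_decide]
  constructor
  · rintro (rfl | h | h)
    · exact absurd rfl hx
    · exact absurd h ht
    · exact h
  · intro h
    exact Or.inr (Or.inr h)

-- counting a predicate that is false at a over a :: l ignores the leading run of a's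
lemma pv_countP_dropWhile {a : Int} (l : List Int) (p : Int → Bool) (hpa : p a = false) :
    (a :: l).countP p = (l.dropWhile (· == a)).countP p := by
  have ht : (l.takeWhile (· == a)).countP p = 0 := by
    rw [List.countP_eq_zero]
    intro x hxm
    have hxa : x = a := by simpa using List.mem_takeWhile_imp hxm
    simp [hxa, hpa]
  simp only [List.countP_cons, hpa]
  conv_lhs => rw [← List.takeWhile_append_dropWhile (p := (· == a)) (l := l)]
  rw [List.countP_append, ht]
  simp

-- the merge over two sorted lists computes the two unique-element counts
lemma pvMergeCount_spec : ∀ (as bs : List Int), as.Pairwise (· ≤ ·) → bs.Pairwise (· ≤ ·) →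
    pvMergeCount as bs =
      (as.countP (fun x => !(bs.contains x)), bs.countP (fun x => !(as.contains x))) := by
  intro as bs
  induction as, bs using pvMergeCount.induct with
  | case1 bs =>
    intro _ _
    simp [pvMergeCount]
  | case2 a as =>
    intro _ _
    simp [pvMergeCount]
  | case3 a as b bs hab ih =>
    intro hpa hpb
    have hble : ∀ y ∈ b :: bs, b ≤ y := by
      intro y hy
      rcases List.mem_cons.mp hy with rfl | h
      · exact le_refl _
      · exact List.rel_of_pairwise_cons hpb h
    have h1 : (a :: as).countP (fun x => !((b :: bs).contains x)) =
        as.countP (fun x => !((b :: bs).contains x)) + 1 := by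
      simp [List.countP_cons]
      exact ⟨by omega, fun hm => by have := hble a (List.mem_cons_of_mem _ hm); omega⟩
    have h2 : (b :: bs).countP (fun x => !((a :: as).contains x)) =
        (b :: bs).countP (fun x => !(as.contains x)) := by
      apply List.countP_congr
      intro x hx
      have hne : x ≠ a := by have := hble x hx; omega
      simp [List.contains_eq_mem, List.mem_cons, hne]
    rw [pvMergeCount, if_pos hab, ih hpa.tail hpb, h1, h2]
  | case4 a as b bs hab hba ih =>
    intro hpa hpb
    have hale : ∀ y ∈ a :: as, a ≤ y := by
      intro y hy
      rcases List.mem_cons.mp hy with rfl | h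
      · exact le_refl _
      · exact List.rel_of_pairwise_cons hpa h
    have h1 : (b :: bs).countP (fun x => !((a :: as).contains x)) =
        bs.countP (fun x => !((a :: as).contains x)) + 1 := by
      simp [List.countP_cons]
      exact ⟨by omega, fun hm => by have := hale b (List.mem_cons_of_mem _ hm); omega⟩
    have h2 : (a :: as).countP (fun x => !((b :: bs).contains x)) =
        (a :: as).countP (fun x => !(bs.contains x)) := by
      apply List.countP_congr
      intro x hx
      have hne : x ≠ b := by have := hale x hx; omega
      simp [List.contains_eq_mem, List.mem_cons, hne]
    rw [pvMergeCount, if_neg hab, if_pos hba, ih hpa hpb.tail, h1, h2]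
  | case5 a as b bs hab hba ih =>
    intro hpa hpb
    have hEq : a = b := le_antisymm (not_lt.mp hba) (not_lt.mp hab)
    subst hEq
    have hale : ∀ y ∈ as, a ≤ y := fun y hy => List.rel_of_pairwise_cons hpa hy
    have hble : ∀ y ∈ bs, a ≤ y := fun y hy => List.rel_of_pairwise_cons hpb hy
    have h1 : (a :: as).countP (fun x => !((a :: bs).contains x)) =
        (as.dropWhile (· == a)).countP (fun x => !((bs.dropWhile (· == a)).contains x)) := by
      rw [pv_countP_dropWhile as _ (by simp)]
      apply List.countP_congr
      intro x hx
      have hlt : a < x := pv_lt_of_mem_dropWhile hpa.tail hale hx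
      rw [pv_contains_dropWhile (by omega : x ≠ a)]
    have h2 : (a :: bs).countP (fun x => !((a :: as).contains x)) =
        (bs.dropWhile (· == a)).countP (fun x => !((as.dropWhile (· == a)).contains x)) := by
      rw [pv_countP_dropWhile bs _ (by simp)]
      apply List.countP_congr
      intro x hx
      have hlt : a < x := pv_lt_of_mem_dropWhile hpb.tail hble hx
      rw [pv_contains_dropWhile (by omega : x ≠ a)]
    rw [pvMergeCount, if_neg hab, if_neg hba,
      ih (hpa.tail.sublist (List.dropWhile_sublist _)) (hpb.tail.sublist (List.dropWhile_sublist _)),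
      h1, h2]

-- A's appended-list pass computes the filter of the input
lemma pv_portA_pass (xs ys : List Int) :
    xs.foldl (fun acc i => if !(ys.contains i) then acc ++ [i] else acc) []
    = (xs.filter (fun i => !(ys.contains i))).map id := by
  simpa using PySem.List.foldl_append_if (fun i => !(ys.contains i)) id xs []

-- sorting changes neither countP nor the membership predicate
lemma pv_count_sorted (xs ys : List Int) :
    (PySem.List.sorted xs (fun x => x) false).countP
      (fun x => !((PySem.List.sorted ys (fun x => x) false).contains x))
    = xs.countP (fun x => !(ys.contains x)) := by
  have h1 : ∀ x : Int, ((PySem.List.sorted ys (fun x => x) false).contains x) = (ys.contains x) := by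
    intro x
    simp [List.contains_eq_mem, PySem.List.mem_sorted]
  calc (PySem.List.sorted xs (fun x => x) false).countP
        (fun x => !((PySem.List.sorted ys (fun x => x) false).contains x))
      = (PySem.List.sorted xs (fun x => x) false).countP (fun x => !(ys.contains x)) := by
        apply List.countP_congr; intro x _; rw [h1]
    _ = xs.countP (fun x => !(ys.contains x)) := (PySem.List.sorted_perm xs _ _).countP_eq _

-- ===== VERDICT (by name: the statement is the Claim_ definition above) =====
theorem consulta_max_productos_intercambio_spec : Claim_equal_consulta_max_productos_intercambio := by
  intro lp ls _
  unfold Spec_consulta_max_productos_intercambio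
  simp only [consulta_max_productos_intercambio, consulta_max_productos_intercambio_alt]
  rw [pvMergeCount_spec _ _ (PySem.List.sorted_pairwise lp (fun x => x))
    (PySem.List.sorted_pairwise ls (fun x => x))]
  simp only [pv_count_sorted, pv_portA_pass, List.length_map, ← List.countP_eq_length_filter]
  split_ifs with h <;> omega
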